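-- pv_equiv track=rewrite | github.com/cheeeraag/bbl434assignment1 | plasmid_designer.py | find_ori_by_gc_skew
-- ===== SOURCE A (Python) =====
-- def find_ori_by_gc_skew(genome, window=500):
--     """Simplified GC-skew based ORI detection.
--
--     If the genome is shorter than the window, return the whole genome.
--     Genome is normalized to uppercase for consistent counting.
--     """
--     genome = genome.upper()
--     if len(genome) <= window:
--         return genome
--
--     skew = []
--     for i in range(len(genome) - window + 1):
--         segment = genome[i:i+window]
--         g = segment.count("G")
--         c = segment.count("C")
--         skew.append(g - c)
--
--     ori_index = skew.index(max(skew))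
--     return genome[ori_index:ori_index+window]
-- ===== SOURCE B (Python) =====
-- def find_ori_by_gc_skew(genome, window=500):
--     """Sliding-window G-C skew via prefix sums: O(n) instead of O(n*window)."""
--     g = genome.upper()
--     n = len(g)
--     if n <= window:
--         return g
--     prefix = [0]
--     for ch in g:
--         prefix.append(prefix[-1] + (1 if ch == 'G' else -1 if ch == 'C' else 0))
--     best = prefix[window] - prefix[0]
--     best_i = 0
--     for i in range(1, n - window + 1):
--         cur = prefix[i + window] - prefix[i]
--         if cur > best:
--             best, best_i = cur, i
--     return g[best_i:best_i + window]
-- ===== Notes on version B (the rewrite author's own statement) =====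
-- stated objective: faster
-- what changed: Replaces the O(n*window) loop that re-slices and re-counts G/C in every window with a single prefix-sum pass over the genome plus one linear scan tracking the first argmax.
-- outside the precondition, e.g. on find_ori_by_gc_skew('GCATG', -1): A returns 'GCAT', B raises IndexError
import Mathlib
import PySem

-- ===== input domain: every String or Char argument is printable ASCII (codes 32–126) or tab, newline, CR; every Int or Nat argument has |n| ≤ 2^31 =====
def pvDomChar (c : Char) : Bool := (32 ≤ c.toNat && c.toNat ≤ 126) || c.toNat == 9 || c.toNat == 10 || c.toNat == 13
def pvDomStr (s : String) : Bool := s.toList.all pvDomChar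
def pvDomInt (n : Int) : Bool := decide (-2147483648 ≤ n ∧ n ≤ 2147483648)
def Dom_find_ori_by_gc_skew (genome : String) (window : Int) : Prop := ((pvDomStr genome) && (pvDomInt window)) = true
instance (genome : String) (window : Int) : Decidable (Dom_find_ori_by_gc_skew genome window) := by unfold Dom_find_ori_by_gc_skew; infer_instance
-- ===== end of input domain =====

-- B replaces A's re-count-per-window O(n*window) scan by a pref-sum pass and one
-- linear first-argmax scan (measured faster); proved equal on windows ≥ 0.


-- ===== PORT A =====
def find_ori_by_gc_skew (genome : String) (window : Int) : String :=
  let genome := PySem.Str.upper genome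
  if PySem.Str.len genome ≤ window then genome
  else
    let skew : List Int :=
      (PySem.List.pyRange 0 (PySem.Str.len genome - window + 1) 1).foldl
        (fun acc i =>
          let segment := PySem.Str.slice genome (some i) (some (i + window))
          let g : Int := PySem.Str.count segment "G"
          let c : Int := PySem.Str.count segment "C"
          acc ++ [g - c]) []
    match PySem.List.max? skew (fun x => x) with
    | none => ""        -- unreachable: skew is nonempty here (Python max([]) would raise)
    | some m =>
      match PySem.List.index? skew m with
      | none => ""      -- unreachable: m ∈ skew
      | some ori_index =>
        PySem.Str.slice genome (some (ori_index : Int)) (some ((ori_index : Int) + window))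

-- ===== PORT B =====
def find_ori_by_gc_skew_alt (genome : String) (window : Int) : String :=
  let g := PySem.Str.upper genome
  let n : Int := PySem.Str.len g
  if n ≤ window then g
  else
    let pref : List Int :=
      g.toList.foldl
        (fun p ch =>
          p ++ [PySem.List.pyGetD p (-1) 0 +
                (if ch = 'G' then (1 : Int) else if ch = 'C' then -1 else 0)])
        [0]
    -- pref[-1] / pref[i] are in range under Pre_ (0 ≤ window), hence pyGetD's default is never used
    let st : Int × Int :=
      (PySem.List.pyRange 1 (n - window + 1) 1).foldl
        (fun bi i =>
          let cur := PySem.List.pyGetD pref (i + window) 0 - PySem.List.pyGetD pref i 0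
          if bi.1 < cur then (cur, i) else bi)
        (PySem.List.pyGetD pref window 0 - PySem.List.pyGetD pref 0 0, 0)
    PySem.Str.slice g (some st.2) (some (st.2 + window))

-- ===== PRECONDITION & SPEC =====
-- Pre_ excludes negative windows: there A slices with Python negative-index wraparound (an
-- accidental value nobody would specify, e.g. A("GCATG",-1) = "GCAT") while B raises IndexError.
def Pre_find_ori_by_gc_skew (genome : String) (window : Int) : Prop := 0 ≤ window
instance (genome : String) (window : Int) : Decidable (Pre_find_ori_by_gc_skew genome window) := by unfold Pre_find_ori_by_gc_skew; infer_instance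
def pvWitness_find_ori_by_gc_skew : String × Int := ("GCATGCgcat", 3)

def Spec_find_ori_by_gc_skew (genome : String) (window : Int) (out : String) : Prop := out = find_ori_by_gc_skew_alt genome window
instance (genome : String) (window : Int) (out : String) : Decidable (Spec_find_ori_by_gc_skew genome window out) := by unfold Spec_find_ori_by_gc_skew; infer_instance

-- ===== CLAIM (what is proved, stated in full; the proofs are below) =====
def Claim_equal_find_ori_by_gc_skew : Prop := ∀ (genome : String) (window : Int), Dom_find_ori_by_gc_skew genome window → Pre_find_ori_by_gc_skew genome window → Spec_find_ori_by_gc_skew genome window (find_ori_by_gc_skew genome window)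

-- ===== LEMMAS AND PROOFS =====

-- per-character G/C skew contribution and its sum over a segment
def pvD (ch : Char) : Int := if ch = 'G' then 1 else if ch = 'C' then -1 else 0

def pvS (l : List Char) : Int := (l.map pvD).sum

-- s.count("G") for a one-character pattern is the plain character count
lemma pvCountGo (c : Char) : ∀ (l : List Char) (fuel acc : ℕ), l.length ≤ fuel →
    PySem.Chars.count.go [c] fuel l acc = acc + l.count c := by
  intro l
  induction l with
  | nil =>
    intro fuel acc _
    cases fuel <;> simp [PySem.Chars.count.go]
  | cons h t ih =>
    intro fuel acc hf
    cases fuel with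
    | zero => simp at hf
    | succ f =>
      by_cases hc : c = h
      · subst hc
        simp only [PySem.Chars.count.go, List.isPrefixOf, BEq.rfl, Bool.true_and,
          if_pos, List.length_singleton, List.drop_one, List.tail_cons]
        rw [ih f (acc + 1) (by simpa using hf)]
        simp
        omega
      · have hbeq : ([c].isPrefixOf (h :: t)) = false := by
          simp [List.isPrefixOf, hc]
        simp only [PySem.Chars.count.go, hbeq, Bool.false_eq_true, if_neg, not_false_iff]
        rw [ih f acc (by simpa using hf)]
        simp [Ne.symm hc]
lemma pvCountSingle (l : List Char) (c : Char) :
    PySem.Chars.count l [c] = l.count c := by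
  simp only [PySem.Chars.count, List.isEmpty, Bool.false_eq_true, if_neg, not_false_iff]
  simpa using pvCountGo c l l.length 0 le_rfl

lemma pvCountDiff (l : List Char) :
    ((l.count 'G' : Int)) - ((l.count 'C' : Int)) = pvS l := by
  induction l with
  | nil => simp [pvS]
  | cons h t ih =>
    by_cases hG : h = 'G'
    · subst hG; simp [pvS, pvD] at *; omega
    · by_cases hC : h = 'C'
      · subst hC; simp [pvS, pvD] at *; omega
      · simp [hG, hC, pvS, pvD] at *; omega

-- the prefix-sum list B builds
def pvPrefAux (a : Int) : List Char → List Int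
  | [] => []
  | ch :: t => (a + pvD ch) :: pvPrefAux (a + pvD ch) t

lemma pvFoldPref (l : List Char) : ∀ (acc : List Int) (a : Int),
    l.foldl
      (fun p ch => p ++ [PySem.List.pyGetD p (-1) 0 +
        (if ch = 'G' then (1 : Int) else if ch = 'C' then -1 else 0)])
      (acc ++ [a])
    = acc ++ a :: pvPrefAux a l := by
  induction l with
  | nil => intro acc a; simp [pvPrefAux]
  | cons ch t ih =>
    intro acc a
    simp only [List.foldl_cons, PySem.List.pyGetD_neg_one_append_singleton]
    have : (acc ++ [a]) ++ [a + (if ch = 'G' then (1 : Int) else if ch = 'C' then -1 else 0)]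
        = (acc ++ [a]) ++ [a + pvD ch] := by simp [pvD]
    rw [this, ih (acc ++ [a]) (a + pvD ch)]
    simp [pvPrefAux]

lemma pvPrefAuxEq (l : List Char) : ∀ a : Int,
    pvPrefAux a l = (List.range l.length).map (fun k => a + pvS (l.take (k + 1))) := by
  induction l with
  | nil => intro a; simp [pvPrefAux]
  | cons ch t ih =>
    intro a
    rw [List.length_cons, List.range_succ_eq_map]
    simp only [pvPrefAux, List.map_cons, List.map_map]
    congr 1
    · simp [pvS, pvD]
    · rw [ih (a + pvD ch)]
      apply List.map_congr_left
      intro k _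
      simp [pvS, List.take_succ_cons, Function.comp]
      ring

lemma pvPrefList (u : List Char) :
    u.foldl
      (fun p ch => p ++ [PySem.List.pyGetD p (-1) 0 +
        (if ch = 'G' then (1 : Int) else if ch = 'C' then -1 else 0)])
      [0]
    = (List.range (u.length + 1)).map (fun k => pvS (u.take k)) := by
  have h := pvFoldPref u [] 0
  simp only [List.nil_append] at h
  rw [h, pvPrefAuxEq u 0, List.range_succ_eq_map]
  simp [pvS, List.map_map]

lemma pvPrefGet (u : List Char) (i : Int) (h0 : 0 ≤ i) (h1 : i ≤ (u.length : Int)) :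
    PySem.List.pyGetD ((List.range (u.length + 1)).map (fun k => pvS (u.take k))) i 0
      = pvS (u.take i.toNat) := by
  rw [PySem.List.pyGetD_eq_getElem _ 0 h0 (by simp; omega)]
  simp [List.getElem_map, List.getElem_range]

lemma pvSkewAt (u : List Char) (i w : ℕ) :
    pvS (u.take (i + w)) - pvS (u.take i) = pvS ((u.drop i).take w) := by
  rw [List.take_add]
  simp [pvS]

-- first-argmax state machine shared by both proofs
def pvBest (F : ℕ → Int) : ℕ → Int × Int
  | 0 => (F 0, 0)
  | j + 1 => if (pvBest F j).1 < F (j + 1) then (F (j + 1), (j + 1 : ℕ)) else pvBest F j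

lemma pvBestSnd (F : ℕ → Int) (j : ℕ) :
    0 ≤ (pvBest F j).2 ∧ (pvBest F j).2 ≤ (j : Int) := by
  induction j with
  | zero => simp [pvBest]
  | succ m ih =>
    simp only [pvBest]
    split
    · constructor <;> push_cast <;> omega
    · constructor
      · exact ih.1
      · exact le_trans ih.2 (by push_cast; omega)

lemma pvArgmax (F : ℕ → Int) : ∀ j : ℕ,
    PySem.List.max? ((List.range (j + 1)).map F) (fun x => x) = some ((pvBest F j).1) ∧
    PySem.List.index? ((List.range (j + 1)).map F) ((pvBest F j).1)
      = some ((pvBest F j).2.toNat) := by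
  intro j
  induction j with
  | zero =>
    constructor
    · simp [PySem.List.max?_id_cons, pvBest]
    · rw [show (List.range 1).map F = [F 0] by simp]
      simp [pvBest]
  | succ m ih =>
    have hsplit : (List.range (m + 2)).map F = (List.range (m + 1)).map F ++ [F (m + 1)] := by
      rw [List.range_succ, List.map_append]; simp
    have hmem : (pvBest F m).1 ∈ (List.range (m + 1)).map F := PySem.List.max?_mem ih.1
    have hmax : ∀ y ∈ (List.range (m + 1)).map F, y ≤ (pvBest F m).1 := by
      intro y hy; exact PySem.List.max?_isMax ih.1 y hy
    obtain ⟨x, t, hl⟩ : ∃ x t, (List.range (m + 1)).map F = x :: t := by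
      rw [List.range_succ_eq_map]; simp
    have hfold : t.foldl max x = (pvBest F m).1 := by
      have := ih.1
      rw [hl, PySem.List.max?_id_cons] at this
      exact (Option.some_inj.mp this)
    by_cases hlt : (pvBest F m).1 < F (m + 1)
    · have hnew : (pvBest F (m + 1)) = (F (m + 1), ((m + 1 : ℕ) : Int)) := by
        simp [pvBest, hlt]
      have hnotmem : F (m + 1) ∉ (List.range (m + 1)).map F := by
        intro hmem'
        exact absurd (hmax _ hmem') (by omega)
      constructor
      · rw [hsplit, hl, List.cons_append, PySem.List.max?_id_cons, List.foldl_append]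
        simp only [List.foldl_cons, List.foldl_nil, hfold]
        rw [hnew]
        simp [max_eq_right (le_of_lt hlt)]
      · rw [hsplit, hnew]
        simp only
        rw [PySem.List.index?_append_singleton_self _ _ hnotmem]
        simp
    · have hold : (pvBest F (m + 1)) = pvBest F m := by simp [pvBest, hlt]
      constructor
      · rw [hsplit, hl, List.cons_append, PySem.List.max?_id_cons, List.foldl_append]
        simp only [List.foldl_cons, List.foldl_nil, hfold]
        rw [hold, max_eq_left (by omega)]
      · rw [hsplit, hold, PySem.List.index?_append_of_mem _ hmem]
        exact ih.2

lemma pvBestCongr (F G : ℕ → Int) : ∀ m : ℕ, (∀ k ≤ m, F k = G k) → pvBest F m = pvBest G m := by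
  intro m
  induction m with
  | zero => intro h; simp [pvBest, h 0 (le_refl 0)]
  | succ j ih =>
    intro h
    simp only [pvBest, ih (fun k hk => h k (le_trans hk (Nat.le_succ j))), h (j + 1) le_rfl]

lemma pvBFold (G : Int → Int) (m : ℕ) :
    ((List.range m).map (fun k : ℕ => (1 : Int) + ↑k)).foldl
      (fun bi i => if bi.1 < G i then (G i, i) else bi) (G 0, 0)
    = pvBest (fun k => G (k : Int)) m := by
  induction m with
  | zero => simp [pvBest]
  | succ j ih =>
    rw [List.range_succ, List.map_append, List.foldl_append, ih]
    simp only [List.map_cons, List.map_nil, List.foldl_cons, List.foldl_nil, pvBest]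
    have hc : (1 : Int) + (j : Int) = ((j + 1 : ℕ) : Int) := by push_cast; ring
    rw [hc]

-- ===== VERDICT (by name: the statement is the Claim_ definition above) =====
theorem find_ori_by_gc_skew_spec : Claim_equal_find_ori_by_gc_skew := by
  intro genome window _ hpre
  unfold Spec_find_ori_by_gc_skew find_ori_by_gc_skew find_ori_by_gc_skew_alt
  simp only []
  by_cases hle : PySem.Str.len (PySem.Str.upper genome) ≤ window
  · rw [if_pos hle, if_pos hle]
  · rw [if_neg hle, if_neg hle]
    have hpre' : (0 : Int) ≤ window := hpre
    set g := PySem.Str.upper genome with hg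
    set u := g.toList with hu
    have hlen : PySem.Str.len g = (u.length : Int) := PySem.Str.len_eq g
    set w' : ℕ := window.toNat with hw'
    have hwin : window = (w' : Int) := by omega
    have hlt : w' < u.length := by
      rw [hlen] at hle; omega
    set mm : ℕ := u.length - w' with hmm
    set F : ℕ → Int := fun k => pvS ((u.drop k).take w') with hF
    -- the A-side skew list is the map of F over range (mm+1)
    have hrangeA : PySem.Str.len g - window + 1 - 0 = ((mm + 1 : ℕ) : Int) := by
      rw [hlen]; omega
    have hbody : ∀ k : ℕ,
        ((PySem.Str.count (PySem.Str.slice g (some ((0:Int) + (k:Int))) (some ((0:Int) + (k:Int) + window))) "G" : Int)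
          - (PySem.Str.count (PySem.Str.slice g (some ((0:Int) + (k:Int))) (some ((0:Int) + (k:Int) + window))) "C" : Int))
        = F k := by
      intro k
      have hseg : (PySem.Str.slice g (some ((0:Int) + (k:Int))) (some ((0:Int) + (k:Int) + window))).toList
          = (u.drop k).take w' := by
        rw [PySem.Str.toList_slice, PySem.Chars.slice_eq_listSlice, ← hu]
        rw [hwin]
        rw [show (0:Int) + (k:Int) = ((k:ℕ) : Int) by ring]
        exact PySem.List.slice_natCast_add u k w'
      rw [PySem.Str.count_eq, PySem.Str.count_eq, hseg]
      rw [show ("G".toList) = ['G'] from rfl, show ("C".toList) = ['C'] from rfl]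
      rw [pvCountSingle, pvCountSingle, pvCountDiff]
    have hskew :
        (PySem.List.pyRange 0 (PySem.Str.len g - window + 1) 1).foldl
          (fun acc i =>
            acc ++ [((PySem.Str.count (PySem.Str.slice g (some i) (some (i + window))) "G" : Int)
              - (PySem.Str.count (PySem.Str.slice g (some i) (some (i + window))) "C" : Int))]) []
        = (List.range (mm + 1)).map F := by
      rw [PySem.List.pyRange_one, PySem.List.foldl_append_singleton_eq_map, List.nil_append,
        List.map_map, hrangeA]
      rw [show ((mm + 1 : ℕ) : Int).toNat = mm + 1 by omega]
      apply List.map_congr_left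
      intro k _
      exact hbody k
    rw [hskew]
    simp only [(pvArgmax F mm).1, (pvArgmax F mm).2]
    -- B side: the prefix list
    have hpref : u.foldl
        (fun p ch => p ++ [PySem.List.pyGetD p (-1) 0 +
          (if ch = 'G' then (1 : Int) else if ch = 'C' then -1 else 0)]) [0]
        = (List.range (u.length + 1)).map (fun k => pvS (u.take k)) := pvPrefList u
    rw [hpref]
    set pref := (List.range (u.length + 1)).map (fun k => pvS (u.take k)) with hprefd
    set G : Int → Int := fun i => PySem.List.pyGetD pref (i + window) 0 - PySem.List.pyGetD pref i 0 with hG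
    have hGk : ∀ k : ℕ, k ≤ mm → G (k : Int) = F k := by
      intro k hk
      show PySem.List.pyGetD pref ((k : Int) + window) 0 - PySem.List.pyGetD pref (k : Int) 0 = F k
      rw [hprefd, pvPrefGet u ((k : Int) + window) (by omega) (by omega),
        pvPrefGet u (k : Int) (by omega) (by omega)]
      rw [show ((k : Int) + window).toNat = k + w' by omega, show ((k : Int)).toNat = k by omega]
      exact pvSkewAt u k w'
    have hinit : (PySem.List.pyGetD pref window 0 - PySem.List.pyGetD pref 0 0, (0 : Int)) = (G 0, 0) := by
      rw [hG]; simp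
    have hrangeB : PySem.Str.len g - window + 1 - 1 = ((mm : ℕ) : Int) := by
      rw [hlen]; omega
    have hfoldB :
        (PySem.List.pyRange 1 (PySem.Str.len g - window + 1) 1).foldl
          (fun bi i =>
            if bi.1 < PySem.List.pyGetD pref (i + window) 0 - PySem.List.pyGetD pref i 0 then
              (PySem.List.pyGetD pref (i + window) 0 - PySem.List.pyGetD pref i 0, i) else bi)
          (PySem.List.pyGetD pref window 0 - PySem.List.pyGetD pref 0 0, 0)
        = pvBest (fun k => G (k : Int)) mm := by
      rw [PySem.List.pyRange_one, hrangeB, hinit]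
      rw [show ((mm : ℕ) : Int).toNat = mm by omega]
      exact pvBFold G mm
    rw [hfoldB, pvBestCongr (fun k => G (k : Int)) F mm hGk]
    have hb2 := pvBestSnd F mm
    rw [show (((pvBest F mm).2.toNat : ℕ) : Int) = (pvBest F mm).2 by omega]
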